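-- pv_equiv track=rewrite | github.com/AhmedShafique313/LeetCode-Interviews | binary_generation.py | binary_numbers
-- ===== SOURCE A (Python) =====
-- def binary_numbers(n):
--     queue = ["1"]
--     result = []
--     for i in range(n):
--         binary = queue.pop(0)
--         result.append(binary)
--         queue.append(binary + '0')
--         queue.append(binary + '1')
--     return result
-- ===== SOURCE B (Python) =====
-- def binary_numbers(n):
--     return [bin(i)[2:] for i in range(1, n + 1)]
-- ===== Notes on version B (the rewrite author's own statement) =====
-- stated objective: faster
-- what changed: Replaces the BFS queue with quadratic-cost pop(0)/append by directly formatting each integer 1..n with bin(i)[2:] in one pass.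
import Mathlib
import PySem

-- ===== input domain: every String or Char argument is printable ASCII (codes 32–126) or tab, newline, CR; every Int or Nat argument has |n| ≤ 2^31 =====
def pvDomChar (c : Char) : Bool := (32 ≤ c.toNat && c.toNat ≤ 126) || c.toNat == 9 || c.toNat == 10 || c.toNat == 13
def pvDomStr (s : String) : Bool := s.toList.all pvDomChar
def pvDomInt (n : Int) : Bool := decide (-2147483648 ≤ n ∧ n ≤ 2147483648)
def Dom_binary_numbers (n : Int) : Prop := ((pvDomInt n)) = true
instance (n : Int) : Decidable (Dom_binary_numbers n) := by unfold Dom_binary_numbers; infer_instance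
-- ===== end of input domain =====

-- B replaces the BFS queue (quadratic pop(0)/append) by formatting each integer 1..n in binary directly.


-- ===== PORT A =====
def binary_numbers (n : Int) : List String :=
  (PySem.List.pyRange 0 n 1).foldl
    (fun (st : List String × List String) _ =>
      match st.1 with
      | [] => st          -- queue.pop(0) on an empty queue: unreachable, the queue is never empty
      | binary :: rest =>
          (rest ++ [binary ++ "0", binary ++ "1"], st.2 ++ [binary]))
    (["1"], []) |>.2

-- ===== PORT B =====
def binary_numbers_alt (n : Int) : List String :=
  (PySem.List.pyRange 1 (n + 1) 1).map (fun i => PySem.Int.toBin i)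

-- ===== PRECONDITION & SPEC =====
def Spec_binary_numbers (n : Int) (out : List String) : Prop := out = binary_numbers_alt n
instance (n : Int) (out : List String) : Decidable (Spec_binary_numbers n out) := by unfold Spec_binary_numbers; infer_instance

-- ===== CLAIM (what is proved, stated in full; the proofs are below) =====
def Claim_equal_binary_numbers : Prop := ∀ (n : Int), Dom_binary_numbers n → Spec_binary_numbers n (binary_numbers n)

-- ===== LEMMAS AND PROOFS =====

-- binChars m: the binary digits of m (MSB first); proof-side model of Nat.toDigits 2
def binChars (m : Nat) : List Char :=
  if h : m = 0 then [] else binChars (m / 2) ++ [if m % 2 = 1 then '1' else '0']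
decreasing_by exact Nat.div_lt_self (Nat.pos_of_ne_zero h) one_lt_two

def bS (m : Nat) : String := String.ofList (binChars m)

theorem binChars_zero : binChars 0 = [] := by rw [binChars]; rw [dif_pos rfl]

theorem binChars_one : binChars 1 = ['1'] := by
  rw [binChars]; norm_num [binChars_zero]

theorem binChars_even (m : Nat) (h : 1 ≤ m) : binChars (2 * m) = binChars m ++ ['0'] := by
  rw [binChars]
  rw [dif_neg (by omega : ¬ 2 * m = 0)]
  rw [show 2 * m / 2 = m by omega, show 2 * m % 2 = 0 by omega]
  norm_num

theorem binChars_odd (m : Nat) (h : 1 ≤ m) : binChars (2 * m + 1) = binChars m ++ ['1'] := by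
  rw [binChars]
  rw [dif_neg (by omega : ¬ 2 * m + 1 = 0)]
  rw [show (2 * m + 1) / 2 = m by omega, show (2 * m + 1) % 2 = 1 by omega]
  norm_num

theorem bS_even (m : Nat) (h : 1 ≤ m) : bS m ++ "0" = bS (2 * m) := by
  apply String.toList_inj.mp
  simp [bS, binChars_even m h]

theorem bS_odd (m : Nat) (h : 1 ≤ m) : bS m ++ "1" = bS (2 * m + 1) := by
  apply String.toList_inj.mp
  simp [bS, binChars_odd m h]

theorem bS_one : bS 1 = "1" := by
  apply String.toList_inj.mp
  simp [bS, binChars_one]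

theorem toDigitsCore_eq_binChars :
    ∀ (fuel m : Nat), 1 ≤ m → m ≤ fuel → ∀ (ds : List Char),
      Nat.toDigitsCore 2 fuel m ds = binChars m ++ ds := by
  intro fuel
  induction fuel with
  | zero => intro m h1 h2; omega
  | succ f ih =>
    intro m h1 h2 ds
    rw [Nat.toDigitsCore]
    by_cases hz : m / 2 = 0
    · have hm1 : m = 1 := by omega
      subst hm1
      simp [binChars_one, Nat.digitChar]
    · rw [if_neg hz, ih (m / 2) (by omega) (by omega)]
      conv_rhs => rw [binChars]
      rw [dif_neg (by omega : ¬ m = 0)]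
      rcases Nat.mod_two_eq_zero_or_one m with hm | hm <;> simp [hm, Nat.digitChar]

theorem toBin_eq_bS (m : Nat) (h : 1 ≤ m) : PySem.Int.toBin (m : Int) = bS m := by
  unfold PySem.Int.toBin bS
  congr 1
  rw [PySem.Int.toBinChars, if_neg (by omega : ¬ (m : Int) < 0)]
  rw [show ((m : Int)).toNat = m by omega]
  rw [Nat.toDigits, toDigitsCore_eq_binChars (m + 1) m h (by omega) [], List.append_nil]

-- queue invariant: after processing any k-element prefix, result = binaries of 1..k
-- and the queue holds the binaries of k+1..2k+1
theorem loop_inv :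
    ∀ (l : List Int) (k : Nat),
      List.foldl
        (fun (st : List String × List String) _ =>
          match st.1 with
          | [] => st
          | binary :: rest =>
              (rest ++ [binary ++ "0", binary ++ "1"], st.2 ++ [binary]))
        ((List.range' (k + 1) (k + 1)).map bS, (List.range' 1 k).map bS) l
      = ((List.range' (k + 1 + l.length) (k + 1 + l.length)).map bS,
         (List.range' 1 (k + l.length)).map bS) := by
  intro l
  induction l with
  | nil => intro k; simp
  | cons x xs ih =>
    intro k
    rw [List.range'_succ, List.map_cons, List.foldl_cons]
    have hstep :
        (match (bS (k + 1) :: (List.range' (k + 1 + 1) k).map bS,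
                (List.range' 1 k).map bS).1 with
          | [] => (bS (k + 1) :: (List.range' (k + 1 + 1) k).map bS,
                   (List.range' 1 k).map bS)
          | binary :: rest =>
              (rest ++ [binary ++ "0", binary ++ "1"],
               (bS (k + 1) :: (List.range' (k + 1 + 1) k).map bS,
                (List.range' 1 k).map bS).2 ++ [binary]))
        = ((List.range' (k + 2) (k + 2)).map bS, (List.range' 1 (k + 1)).map bS) := by
      simp only []
      rw [bS_even (k + 1) (by omega), bS_odd (k + 1) (by omega)]
      refine congrArg₂ Prod.mk ?_ ?_
      · rw [List.range'_concat, List.range'_concat]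
        simp only [List.map_append, List.map_cons, List.map_nil]
        rw [show k + 2 + 1 * (k + 1) = 2 * (k + 1) + 1 by ring,
            show k + 2 + 1 * k = 2 * (k + 1) by ring]
        simp
      · rw [List.range'_concat]
        simp [show k + 1 = 1 + k by ring]
    rw [hstep]
    have := ih (k + 1)
    rw [show k + 1 + 1 = k + 2 from rfl] at this
    rw [this]
    rw [show k + 2 + xs.length = k + 1 + (xs.length + 1) by omega,
        show k + 1 + xs.length = k + (xs.length + 1) by omega]
    simp only [List.length_cons]

theorem altEq (n : Int) : binary_numbers_alt n = (List.range' 1 n.toNat).map bS := by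
  unfold binary_numbers_alt
  rw [PySem.List.pyRange_one, show n + 1 - 1 = n by ring, List.map_map,
      List.range'_eq_map_range, List.map_map]
  apply List.map_congr_left
  intro k _
  simp only [Function.comp]
  rw [show (1 : Int) + (k : Int) = ((1 + k : Nat) : Int) by push_cast; ring]
  exact toBin_eq_bS (1 + k) (by omega)

-- ===== VERDICT (by name: the statement is the Claim_ definition above) =====
theorem binary_numbers_spec : Claim_equal_binary_numbers := by
  intro n _
  unfold Spec_binary_numbers
  rw [altEq]
  unfold binary_numbers
  have hinit : (["1"], ([] : List String))
      = ((List.range' (0 + 1) (0 + 1)).map bS, (List.range' 1 0).map bS) := by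
    simp [bS_one]
  rw [hinit, loop_inv (PySem.List.pyRange 0 n 1) 0]
  rw [PySem.List.length_pyRange_one]
  simp
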